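-- pv_equiv track=rewrite | github.com/espressif/esp-technical-reference-manual-latex | tools/check_todo_notes_commented_code/check_todo_notes_commented_code.py | _linestart_comment_percent_index
-- ===== SOURCE A (Python) =====
-- def _linestart_comment_percent_index(line):
--     """
--     If the line begins with zero or more ``\\\\`` pairs followed by ``%``, return the index of
--     that ``%``. Otherwise return -1.
--     """
--     j = 0
--     n = len(line)
--     while j + 1 < n and line[j] == '\\' and line[j + 1] == '\\':
--         j += 2
--     if j < n and line[j] == '%':
--         return j
--     return -1
-- ===== SOURCE B (Python) =====
-- def _linestart_comment_percent_index(line):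
--     """
--     If the line begins with zero or more ``\\\\`` pairs followed by ``%``, return the index of
--     that ``%``. Otherwise return -1.
--     """
--     stripped = line.lstrip('\\')
--     k = len(line) - len(stripped)
--     return k if k % 2 == 0 and stripped.startswith('%') else -1
-- ===== Notes on version B (the rewrite author's own statement) =====
-- stated objective: simpler
-- what changed: Replaces the explicit two-chars-per-step index loop by stripping the whole leading backslash run at once (lstrip), then a closed-form parity check on the run length plus a startswith test.
import Mathlib
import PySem

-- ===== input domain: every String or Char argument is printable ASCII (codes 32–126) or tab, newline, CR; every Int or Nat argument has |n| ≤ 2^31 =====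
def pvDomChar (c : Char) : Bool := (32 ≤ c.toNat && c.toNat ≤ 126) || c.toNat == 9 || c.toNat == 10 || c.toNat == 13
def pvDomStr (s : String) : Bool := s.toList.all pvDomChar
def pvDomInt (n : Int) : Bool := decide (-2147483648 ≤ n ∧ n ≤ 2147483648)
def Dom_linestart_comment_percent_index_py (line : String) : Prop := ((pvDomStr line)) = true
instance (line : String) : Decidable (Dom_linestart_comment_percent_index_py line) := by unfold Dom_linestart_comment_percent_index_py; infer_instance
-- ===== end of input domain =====

-- B strips the whole leading backslash run at once and decides by a parity check,
-- instead of A's two-characters-per-step index loop (objective: simpler).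

-- ===== PORT A =====
-- the while loop: 'while j + 1 < n and line[j] == '\' and line[j+1] == '\': j += 2'
-- carried as structural recursion on the not-yet-consumed suffix, with j the index accumulator
def pvAwhile : List Char → Nat → Nat
  | '\\' :: '\\' :: rest, j => pvAwhile rest (j + 2)
  | _, j => j

def linestart_comment_percent_index_py (line : String) : Int :=
  let cs := line.toList
  let n := cs.length
  let j := pvAwhile cs 0
  if h : j < n then
    if cs[j] = '%' then (j : Int) else -1
  else -1

-- ===== PORT B =====
def linestart_comment_percent_index_py_alt (line : String) : Int :=
  let cs := line.toList
  let stripped := cs.dropWhile (· == '\\')    -- line.lstrip('\\'): exact, drops the leading run of '\'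
  let k := cs.length - stripped.length
  if k % 2 = 0 ∧ ['%'].isPrefixOf stripped    -- stripped.startswith('%')
  then (k : Int) else -1

-- ===== PRECONDITION & SPEC =====
def Spec_linestart_comment_percent_index_py (line : String) (out : Int) : Prop := out = linestart_comment_percent_index_py_alt line
instance (line : String) (out : Int) : Decidable (Spec_linestart_comment_percent_index_py line out) := by unfold Spec_linestart_comment_percent_index_py; infer_instance

-- ===== CLAIM (what is proved, stated in full; the proofs are below) =====
def Claim_equal_linestart_comment_percent_index_py : Prop := ∀ (line : String), Dom_linestart_comment_percent_index_py line → Spec_linestart_comment_percent_index_py line (linestart_comment_percent_index_py line)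

-- ===== LEMMAS AND PROOFS =====

-- A's loop lands on the largest even index within the leading backslash run.
theorem pvAwhile_eq (cs : List Char) (j : Nat) :
    pvAwhile cs j = j + 2 * ((cs.takeWhile (· == '\\')).length / 2) := by
  fun_induction pvAwhile cs j with
  | case1 rest j ih =>
      simp only [List.takeWhile_cons, ih]
      norm_num
      omega
  | case2 cs j h =>
      match cs with
      | [] => simp
      | [c] =>
          by_cases hc : c = '\\' <;> simp [List.takeWhile_cons, hc]
      | a :: b :: rest =>
          by_cases ha : a = '\\'
          · by_cases hb : b = '\\'
            · exact ((h rest (by rw [ha, hb])).elim)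
            · simp [List.takeWhile_cons, ha, hb]
          · simp [List.takeWhile_cons, ha]

theorem pv_main (line : String) :
    linestart_comment_percent_index_py line = linestart_comment_percent_index_py_alt line := by
  unfold linestart_comment_percent_index_py linestart_comment_percent_index_py_alt
  generalize line.toList = cs
  obtain ⟨t, d, rfl, ht, hd⟩ :
      ∃ t d, cs = t ++ d ∧ (t ++ d).takeWhile (· == '\\') = t ∧
        (t ++ d).dropWhile (· == '\\') = d :=
    ⟨cs.takeWhile (· == '\\'), cs.dropWhile (· == '\\'),
      (List.takeWhile_append_dropWhile).symm,
      by rw [List.takeWhile_append_dropWhile],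
      by rw [List.takeWhile_append_dropWhile]⟩
  have hall : ∀ c ∈ t, c = '\\' := by
    intro c hc
    have := List.mem_takeWhile_imp (ht ▸ hc)
    simpa using this
  have hJ := pvAwhile_eq (t ++ d) 0
  rw [ht] at hJ
  simp only [hd, List.length_append]
  generalize pvAwhile (t ++ d) 0 = J at hJ ⊢
  have hk : t.length + d.length - d.length = t.length := by omega
  rw [hk]
  by_cases hpar : t.length % 2 = 0
  · -- even run: A's loop index is exactly t.length
    obtain rfl : J = t.length := by omega
    cases d with
    | nil =>
        rw [dif_neg (by simp), if_neg]
        rintro ⟨-, hpre⟩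
        simp [List.isPrefixOf] at hpre
    | cons a as =>
        have hlt : t.length < t.length + (a :: as).length := by simp
        have hget : (t ++ a :: as)[t.length]'(by simpa using hlt) = a := by
          rw [List.getElem_append_right (Nat.le_refl _)]
          simp
        rw [dif_pos (by simpa using hlt), hget]
        by_cases hpc : a = '%'
        · rw [if_pos hpc, if_pos ⟨hpar, by simp [List.isPrefixOf, hpc]⟩]
        · rw [if_neg hpc, if_neg]
          rintro ⟨-, hpre⟩
          simp [List.isPrefixOf] at hpre
          exact hpc hpre.symm
  · -- odd run: A's loop stops one short, reads a backslash, returns -1; B fails the parity test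
    obtain rfl : J = t.length - 1 := by omega
    rw [if_neg (by rintro ⟨h, -⟩; exact hpar h)]
    have hlt : t.length - 1 < t.length + d.length := by omega
    rw [dif_pos (by simpa using hlt)]
    have hget : (t ++ d)[t.length - 1]'(by simpa using hlt) = t[t.length - 1]'(by omega) := by
      rw [List.getElem_append_left (by omega)]
    rw [if_neg (by rw [hget, hall _ (List.getElem_mem _)]; decide)]

-- ===== VERDICT (by name: the statement is the Claim_ definition above) =====
theorem linestart_comment_percent_index_py_spec : Claim_equal_linestart_comment_percent_index_py := by
  intro line _
  exact pv_main line
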